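-- pv_equiv track=rewrite | github.com/ElectricPotato/AdventOfCode | 2022/day15/day15.py | addToGroup
-- ===== SOURCE A (Python) =====
-- def overlapOrTouching(minA, maxA, minB, maxB): #
--     return (max(minA,maxA) <= min(maxA,maxB)) \
--         or (minA == minB) or (minA == maxB) \
--         or (maxA == minB) or (maxA == maxB)
--
-- def combine(minA, maxA, minB, maxB): #boolean or
--     return min(minA, minB), max(maxA, maxB)
--
-- def addToGroup(rangeMin, rangeMax, allRanges):
--     newRanges = []
--     allOverlappingRanges = []
--     for (rMin, rMax) in allRanges:
--         if(overlapOrTouching(rangeMin, rangeMax, rMin, rMax)):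
--             allOverlappingRanges += [(rMin, rMax)]
--         else:
--             newRanges += [(rMin, rMax)]
--
--     #increase range of (rangeMin, rangeMax) to overlap all the other ranges
--     for (rMin, rMax) in allOverlappingRanges:
--         rangeMin, rangeMax = combine(rangeMin, rangeMax, rMin, rMax)
--
--     newRanges += [(rangeMin, rangeMax)]
--
--     return newRanges
-- ===== SOURCE B (Python) =====
-- def overlapOrTouching(minA, maxA, minB, maxB):
--     return (max(minA, maxA) <= min(maxA, maxB)) \
--         or (minA == minB) or (minA == maxB) \
--         or (maxA == minB) or (maxA == maxB)
--
-- def addToGroup(rangeMin, rangeMax, allRanges):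
--     # single pass: fold the overlapping ranges into running accumulators
--     newRanges = []
--     resMin, resMax = rangeMin, rangeMax
--     for (rMin, rMax) in allRanges:
--         if overlapOrTouching(rangeMin, rangeMax, rMin, rMax):
--             if rMin < resMin:
--                 resMin = rMin
--             if rMax > resMax:
--                 resMax = rMax
--         else:
--             newRanges.append((rMin, rMax))
--     newRanges.append((resMin, resMax))
--     return newRanges
-- ===== Notes on version B (the rewrite author's own statement) =====
-- stated objective: simpler
-- what changed: Fused A's two passes (collect overlapping ranges into an intermediate list, then fold combine over it) into one pass that keeps running min/max accumulators and no intermediate list, testing overlap against the fixed original bounds.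
import Mathlib
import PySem

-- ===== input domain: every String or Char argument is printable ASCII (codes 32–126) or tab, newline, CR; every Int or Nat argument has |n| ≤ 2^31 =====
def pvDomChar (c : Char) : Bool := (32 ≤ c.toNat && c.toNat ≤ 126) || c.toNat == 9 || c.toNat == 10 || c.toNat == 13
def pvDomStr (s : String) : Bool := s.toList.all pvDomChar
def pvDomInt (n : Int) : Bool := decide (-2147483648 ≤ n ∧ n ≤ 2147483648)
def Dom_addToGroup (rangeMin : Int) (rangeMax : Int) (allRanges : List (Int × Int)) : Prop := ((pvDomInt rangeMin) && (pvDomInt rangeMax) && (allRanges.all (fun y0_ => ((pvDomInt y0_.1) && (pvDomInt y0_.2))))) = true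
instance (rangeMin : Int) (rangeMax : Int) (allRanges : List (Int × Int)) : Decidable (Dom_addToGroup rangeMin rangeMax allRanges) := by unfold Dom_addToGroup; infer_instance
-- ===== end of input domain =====

-- B fuses A's two passes (collect-overlapping list + combine fold) into one pass with
-- running min/max accumulators; objective: simpler (no intermediate list, one pass).

-- ===== PORT A =====
-- helper overlapOrTouching (identical in Source A and Source B)
def overlapOrTouching (minA maxA minB maxB : Int) : Bool :=
  (max minA maxA ≤ min maxA maxB) || (minA == minB) || (minA == maxB)
    || (maxA == minB) || (maxA == maxB)

-- helper combine
def combine (minA maxA minB maxB : Int) : Int × Int := (min minA minB, max maxA maxB)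

-- A's first loop: split allRanges into (newRanges, allOverlappingRanges), preserving order
def addToGroupLoop1 (rangeMin rangeMax : Int) : List (Int × Int) → List (Int × Int) × List (Int × Int)
  | [] => ([], [])
  | (rMin, rMax) :: rest =>
    let p := addToGroupLoop1 rangeMin rangeMax rest
    if overlapOrTouching rangeMin rangeMax rMin rMax then (p.1, (rMin, rMax) :: p.2)
    else ((rMin, rMax) :: p.1, p.2)

-- A's second loop: fold combine over the overlapping ranges
def addToGroupLoop2 : Int → Int → List (Int × Int) → Int × Int
  | rangeMin, rangeMax, [] => (rangeMin, rangeMax)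
  | rangeMin, rangeMax, (rMin, rMax) :: rest =>
    let p := combine rangeMin rangeMax rMin rMax
    addToGroupLoop2 p.1 p.2 rest

def addToGroup (rangeMin : Int) (rangeMax : Int) (allRanges : List (Int × Int)) : List (Int × Int) :=
  let p := addToGroupLoop1 rangeMin rangeMax allRanges
  p.1 ++ [addToGroupLoop2 rangeMin rangeMax p.2]

-- ===== PORT B =====
-- B's single loop: resMin/resMax accumulators, overlap tested against the fixed original bounds
def addToGroupAltLoop (rangeMin rangeMax : Int) : List (Int × Int) → Int → Int → List (Int × Int)
  | [], resMin, resMax => [(resMin, resMax)]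
  | (rMin, rMax) :: rest, resMin, resMax =>
    if overlapOrTouching rangeMin rangeMax rMin rMax then
      addToGroupAltLoop rangeMin rangeMax rest
        (if rMin < resMin then rMin else resMin)
        (if rMax > resMax then rMax else resMax)
    else (rMin, rMax) :: addToGroupAltLoop rangeMin rangeMax rest resMin resMax

def addToGroup_alt (rangeMin : Int) (rangeMax : Int) (allRanges : List (Int × Int)) : List (Int × Int) :=
  addToGroupAltLoop rangeMin rangeMax allRanges rangeMin rangeMax

-- ===== PRECONDITION & SPEC =====
def Spec_addToGroup (rangeMin : Int) (rangeMax : Int) (allRanges : List (Int × Int)) (out : List (Int × Int)) : Prop := out = addToGroup_alt rangeMin rangeMax allRanges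
instance (rangeMin : Int) (rangeMax : Int) (allRanges : List (Int × Int)) (out : List (Int × Int)) : Decidable (Spec_addToGroup rangeMin rangeMax allRanges out) := by unfold Spec_addToGroup; infer_instance

-- ===== CLAIM (what is proved, stated in full; the proofs are below) =====
def Claim_equal_addToGroup : Prop := ∀ (rangeMin : Int) (rangeMax : Int) (allRanges : List (Int × Int)), Dom_addToGroup rangeMin rangeMax allRanges → Spec_addToGroup rangeMin rangeMax allRanges (addToGroup rangeMin rangeMax allRanges)

-- ===== LEMMAS AND PROOFS =====
-- Loop fusion: B's single pass computes A's (split, then fold) result, for any accumulator start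
theorem altLoop_eq (rangeMin rangeMax : Int) (l : List (Int × Int)) :
    ∀ (a b : Int), addToGroupAltLoop rangeMin rangeMax l a b =
      (addToGroupLoop1 rangeMin rangeMax l).1
        ++ [addToGroupLoop2 a b (addToGroupLoop1 rangeMin rangeMax l).2] := by
  induction l with
  | nil => intro a b; simp [addToGroupAltLoop, addToGroupLoop1, addToGroupLoop2]
  | cons hd tl ih =>
    intro a b
    obtain ⟨rMin, rMax⟩ := hd
    by_cases h : overlapOrTouching rangeMin rangeMax rMin rMax = true
    · have hmin : (if rMin < a then rMin else a) = min a rMin := by split_ifs <;> omega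
      have hmax : (if rMax > b then rMax else b) = max b rMax := by split_ifs <;> omega
      simp [addToGroupAltLoop, addToGroupLoop1, addToGroupLoop2, h, combine, hmin, hmax, ih]
    · simp [addToGroupAltLoop, addToGroupLoop1, h, ih]

-- ===== VERDICT (by name: the statement is the Claim_ definition above) =====
theorem addToGroup_spec : Claim_equal_addToGroup := by
  intro rangeMin rangeMax allRanges _
  unfold Spec_addToGroup addToGroup addToGroup_alt
  simp [altLoop_eq]
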